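-- pv_equiv track=rewrite | github.com/AragonD19/Lab2Redes | receptor.py | decodificarMensaje
-- ===== SOURCE A (Python) =====
-- def hamming_distance(x, y):
--     return sum(el1 != el2 for el1, el2 in zip(x, y))
--
-- def decodificarMensaje(mensajeCodificado, rate):
--     n = len(mensajeCodificado) // rate
--     trellis = [{} for _ in range(n + 1)]
--     trellis[0][0] = (0, '')
--
--     for i in range(n):
--         for state in trellis[i]:
--             for bit in [0, 1]:
--                 new_state = (((state << 1) | bit) & 1)
--                 salida1 = (state & 1) ^ bit
--                 salida2 = ((state >> 1) & 1) ^ bit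
--                 nueva_salida = [salida1, salida2]
--                 new_path = trellis[i][state][1] + str(bit)
--                 metrica = trellis[i][state][0] + hamming_distance([mensajeCodificado[2*i], mensajeCodificado[2*i+1]], nueva_salida)
--
--                 if new_state not in trellis[i + 1] or metrica < trellis[i + 1][new_state][0]:
--                     trellis[i + 1][new_state] = (metrica, new_path)
--
--     best_path = min(trellis[-1].values(), key=lambda x: x[0])[1]
--     return best_path
-- ===== SOURCE B (Python) =====
-- def _best(m0, m1, r0, r1, s):
--     # best predecessor for new state s (bit == s); tie goes to predecessor 0
--     c0 = m0 + (1 if r0 != s else 0) + (1 if r1 != s else 0)        # prev 0: output (0^s, s)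
--     if m1 is None:
--         return c0, 0
--     c1 = m1 + (1 if r0 != 1 - s else 0) + (1 if r1 != s else 0)    # prev 1: output (1^s, s)
--     return (c1, 1) if c1 < c0 else (c0, 0)
--
-- def decodificarMensaje(mensajeCodificado, rate):
--     n = len(mensajeCodificado) // rate
--     m0, m1 = 0, None          # path metric of states 0 and 1 (None = unreachable)
--     back = []                 # back[i] = (pred of state 0, pred of state 1) at step i+1
--     for i in range(n):
--         r0 = mensajeCodificado[2 * i]
--         r1 = mensajeCodificado[2 * i + 1]
--         nm0, bp0 = _best(m0, m1, r0, r1, 0)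
--         nm1, bp1 = _best(m0, m1, r0, r1, 1)
--         m0, m1 = nm0, nm1
--         back.append((bp0, bp1))
--     if m1 is None:            # no step taken: empty message
--         return ''
--     s = 0 if m0 <= m1 else 1
--     bits = []
--     for bp in reversed(back):
--         bits.append(s)        # decoded bit equals the state
--         s = bp[0] if s == 0 else bp[1]
--     bits.reverse()
--     return ''.join(str(b) for b in bits)
-- ===== Notes on version B (the rewrite author's own statement) =====
-- stated objective: alternative
-- what changed: A carries the full decoded path string in every trellis cell, re-concatenating it at each step; B keeps only the two path metrics plus a backpointer per state and step and reconstructs the decoded string by a single traceback at the end.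
import Mathlib
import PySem

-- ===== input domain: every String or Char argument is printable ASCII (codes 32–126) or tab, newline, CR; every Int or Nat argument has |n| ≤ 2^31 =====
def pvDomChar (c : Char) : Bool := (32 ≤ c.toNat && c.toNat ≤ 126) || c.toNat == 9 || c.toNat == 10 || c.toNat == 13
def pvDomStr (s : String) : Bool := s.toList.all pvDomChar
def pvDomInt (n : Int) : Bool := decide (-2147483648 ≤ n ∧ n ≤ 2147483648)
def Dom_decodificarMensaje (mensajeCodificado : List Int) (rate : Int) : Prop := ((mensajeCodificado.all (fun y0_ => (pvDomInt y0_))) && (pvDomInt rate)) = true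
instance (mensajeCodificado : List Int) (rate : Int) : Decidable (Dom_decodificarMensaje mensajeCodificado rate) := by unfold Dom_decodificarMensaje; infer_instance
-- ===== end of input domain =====

-- B replaces A's per-state path strings (rebuilt by concatenation at every trellis step)
-- by per-step backpointers and a single traceback at the end (objective: alternative algorithm).
-- Equivalence is about the RETURN value; neither program mutates its arguments.

-- ===== PORT A =====
-- sum(el1 != el2 for el1, el2 in zip(x, y))
def pvHamming (x y : List Int) : Int :=
  (x.zip y).foldl (fun acc p => acc + (if p.1 ≠ p.2 then 1 else 0)) 0

-- one iteration of A's outer loop: builds trellis[i+1] (starting empty) from trellis[i].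
-- 'for state in trellis[i]' iterates keys and re-looks them up; since a dict's keys are
-- unique, folding over d.items gives exactly those lookups' values.
def pvInner (sv : Int × (Int × String)) (r0 r1 : Int)
    (acc2 : PySem.Dict Int (Int × String)) (bit : Int) : PySem.Dict Int (Int × String) :=
  let state : Int := sv.1
  let new_state := PySem.Int.band (PySem.Int.bor (state <<< (1:Nat)) bit) 1
  let salida1 := PySem.Int.bxor (PySem.Int.band state 1) bit
  let salida2 := PySem.Int.bxor (PySem.Int.band (state >>> (1:Nat)) 1) bit
  let new_path := sv.2.2 ++ PySem.Int.toStr bit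
  let metrica := sv.2.1 + pvHamming [r0, r1] [salida1, salida2]
  if (!acc2.contains new_state) || decide (metrica < (acc2.getD new_state (0, "")).1)
  then acc2.insert new_state (metrica, new_path) else acc2

def pvStepA (d : PySem.Dict Int (Int × String)) (r0 r1 : Int) : PySem.Dict Int (Int × String) :=
  d.items.foldl (fun acc sv => [(0:Int), 1].foldl (pvInner sv r0 r1) acc) PySem.Dict.empty

-- A builds the trellis level by level; only trellis[i] and trellis[i+1] interact at step i
-- (the pre-allocated empty dicts are untouched until their step), and only trellis[-1] = the
-- last level is read at the end, so the trellis list is carried as the current level.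
def decodificarMensaje (mensajeCodificado : List Int) (rate : Int) : String :=
  let n := PySem.Int.floordiv (PySem.List.len mensajeCodificado) rate
  let t0 : PySem.Dict Int (Int × String) := (PySem.Dict.empty).insert 0 (0, "")
  let tn := (PySem.List.pyRange 0 n 1).foldl
      (fun d i => pvStepA d (PySem.List.pyGetD mensajeCodificado (2*i) 0)
                            (PySem.List.pyGetD mensajeCodificado (2*i+1) 0)) t0
  match PySem.List.min? tn.values (fun x => x.1) with
  | some best => best.2
  | none => ""        -- unreachable: the last level always contains state 0

-- ===== PORT B =====
def pvBest (m0 : Int) (m1 : Option Int) (r0 r1 s : Int) : Int × Int :=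
  let c0 := m0 + (if r0 ≠ s then 1 else 0) + (if r1 ≠ s then 1 else 0)
  match m1 with
  | none => (c0, 0)
  | some m1v =>
    let c1 := m1v + (if r0 ≠ 1 - s then 1 else 0) + (if r1 ≠ s then 1 else 0)
    if c1 < c0 then (c1, 1) else (c0, 0)

-- 'for bp in reversed(back): bits.append(s); s = bp[0] if s == 0 else bp[1]'
def pvTraceStep (acc : List Int × Int) (bp : Int × Int) : List Int × Int :=
  (acc.1 ++ [acc.2], if acc.2 = 0 then bp.1 else bp.2)

def pvTraceback (back : List (Int × Int)) (s : Int) : List Int :=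
  (back.reverse.foldl pvTraceStep ([], s)).1

def pvStepB (st : Int × Option Int × List (Int × Int)) (r0 r1 : Int) :
    Int × Option Int × List (Int × Int) :=
  let p0 := pvBest st.1 st.2.1 r0 r1 0
  let p1 := pvBest st.1 st.2.1 r0 r1 1
  (p0.1, some p1.1, st.2.2 ++ [(p0.2, p1.2)])

def decodificarMensaje_alt (mensajeCodificado : List Int) (rate : Int) : String :=
  let n := PySem.Int.floordiv (PySem.List.len mensajeCodificado) rate
  let fin := (PySem.List.pyRange 0 n 1).foldl
      (fun st i => pvStepB st (PySem.List.pyGetD mensajeCodificado (2*i) 0)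
                              (PySem.List.pyGetD mensajeCodificado (2*i+1) 0))
      ((0:Int), (none : Option Int), ([] : List (Int × Int)))
  match fin.2.1 with
  | none => ""                        -- no step taken: empty message
  | some m1 =>
    let s : Int := if fin.1 ≤ m1 then 0 else 1
    PySem.Str.join "" (((pvTraceback fin.2.2 s).reverse).map PySem.Int.toStr)

-- ===== PRECONDITION & SPEC =====
-- Pre_ excludes exactly the inputs where the Python A raises: rate = 0 (ZeroDivisionError),
-- rate < 0 with a nonempty message (IndexError on trellis[0]), and rate = 1 with a nonempty
-- message (IndexError reading mensajeCodificado[2*i+1]).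
def Pre_decodificarMensaje (mensajeCodificado : List Int) (rate : Int) : Prop :=
  2 ≤ rate ∨ (mensajeCodificado = [] ∧ rate ≠ 0)
instance (mensajeCodificado : List Int) (rate : Int) : Decidable (Pre_decodificarMensaje mensajeCodificado rate) := by unfold Pre_decodificarMensaje; infer_instance
def pvWitness_decodificarMensaje : List Int × Int := ([0, 1, 1, 0], 2)

def Spec_decodificarMensaje (mensajeCodificado : List Int) (rate : Int) (out : String) : Prop := out = decodificarMensaje_alt mensajeCodificado rate
instance (mensajeCodificado : List Int) (rate : Int) (out : String) : Decidable (Spec_decodificarMensaje mensajeCodificado rate out) := by unfold Spec_decodificarMensaje; infer_instance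

-- ===== CLAIM (what is proved, stated in full; the proofs are below) =====
def Claim_equal_decodificarMensaje : Prop := ∀ (mensajeCodificado : List Int) (rate : Int), Dom_decodificarMensaje mensajeCodificado rate → Pre_decodificarMensaje mensajeCodificado rate → Spec_decodificarMensaje mensajeCodificado rate (decodificarMensaje mensajeCodificado rate)

-- ===== LEMMAS AND PROOFS =====

-- the state reached after following backpointer bp from state s
def pvSel (bp : Int × Int) (s : Int) : Int := if s = 0 then bp.1 else bp.2

-- the path string A stores for state s, expressed over B's (reversed) backpointer list
def pvPathR : List (Int × Int) → Int → String
  | [], _ => ""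
  | bp :: rest, s => pvPathR rest (pvSel bp s) ++ PySem.Int.toStr s

-- invariant tying A's trellis level to B's (metric0, metric1?, backpointers) state
def pvInv (d : PySem.Dict Int (Int × String)) (st : Int × Option Int × List (Int × Int)) : Prop :=
  match st.2.1 with
  | none => st.1 = 0 ∧ st.2.2 = [] ∧ d = PySem.Dict.empty.insert 0 (0, "")
  | some m1 => d.items = [(0, (st.1, pvPathR st.2.2.reverse 0)), (1, (m1, pvPathR st.2.2.reverse 1))]

theorem pv_flatten_intersperse_nil {α : Type} (xs : List (List α)) :
    (List.intersperse ([] : List α) xs).flatten = xs.flatten := by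
  induction xs with
  | nil => rfl
  | cons h t ih =>
    cases t with
    | nil => rfl
    | cons h2 t2 => simp_all [List.intersperse]

theorem pv_join_snoc (xs : List String) (x : String) :
    PySem.Str.join "" (xs ++ [x]) = PySem.Str.join "" xs ++ x := by
  apply String.toList_inj.mp
  simp [PySem.Str.join, PySem.Chars.join, List.intercalate, pv_flatten_intersperse_nil]

theorem pv_trace_fst_acc (l : List (Int × Int)) : ∀ (acc : List Int) (s : Int),
    (l.foldl pvTraceStep (acc, s)).1 = acc ++ (l.foldl pvTraceStep ([], s)).1 := by
  induction l with
  | nil => intro acc s; simp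
  | cons bp rest ih =>
    intro acc s
    simp only [List.foldl_cons, pvTraceStep]
    rw [ih (acc ++ [s]), ih ([] ++ [s])]
    simp

theorem pv_join_trace (l : List (Int × Int)) : ∀ s : Int,
    PySem.Str.join "" (((l.foldl pvTraceStep ([], s)).1).reverse.map PySem.Int.toStr)
      = pvPathR l s := by
  induction l with
  | nil => intro s; rfl
  | cons bp rest ih =>
    intro s
    simp only [List.foldl_cons, pvTraceStep, pvPathR]
    rw [pv_trace_fst_acc]
    simp only [List.reverse_cons, List.nil_append,
      List.map_append, List.map_cons, List.map_nil, List.cons_append, List.nil_append]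
    rw [pv_join_snoc]
    rw [ih]
    rfl

theorem pvL00 (m0 : Int) (p0 : String) (r0 r1 : Int) :
    pvInner (0, (m0, p0)) r0 r1 PySem.Dict.empty 0 =
      PySem.Dict.mk [(0, (m0 + ((if r0 = 0 then 0 else 1) + (if r1 = 0 then 0 else 1)), p0 ++ PySem.Int.toStr 0))] := by
  simp [pvInner, pvHamming,
      show PySem.Int.band 0 1 = 0 from by decide,
      show PySem.Int.bor 0 0 = 0 from by decide,
      
      show ((0:Int) <<< (1:Nat)) = 0 from by decide,
      show ((0:Int) >>> (1:Nat)) = 0 from by decide,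
    PySem.Dict.insert, PySem.Dict.contains, PySem.Dict.getD,
    PySem.Dict.get?, PySem.Dict.empty]

theorem pvL01 (m0 : Int) (p0 : String) (a0 : Int × String) (r0 r1 : Int) :
    pvInner (0, (m0, p0)) r0 r1 (PySem.Dict.mk [(0, a0)]) 1 =
      PySem.Dict.mk [(0, a0), (1, (m0 + ((if r0 = 1 then 0 else 1) + (if r1 = 1 then 0 else 1)), p0 ++ PySem.Int.toStr 1))] := by
  simp [pvInner, pvHamming,
      show PySem.Int.band 0 1 = 0 from by decide,
      show PySem.Int.bor 0 1 = 1 from by decide,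
      show PySem.Int.bxor 0 1 = 1 from by decide,
      show ((0:Int) <<< (1:Nat)) = 0 from by decide,
      show ((0:Int) >>> (1:Nat)) = 0 from by decide,
    PySem.Dict.insert, PySem.Dict.contains, PySem.Dict.getD,
    PySem.Dict.get?]

theorem pvL10 (m1 : Int) (p1 : String) (a0 a1 : Int × String) (r0 r1 : Int) :
    pvInner (1, (m1, p1)) r0 r1 (PySem.Dict.mk [(0, a0), (1, a1)]) 0 =
      PySem.Dict.mk [(0, if m1 + ((if r0 = 1 then 0 else 1) + (if r1 = 0 then 0 else 1)) < a0.1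
                         then (m1 + ((if r0 = 1 then 0 else 1) + (if r1 = 0 then 0 else 1)), p1 ++ PySem.Int.toStr 0)
                         else a0), (1, a1)] := by
  by_cases hc : m1 + ((if r0 = 1 then 0 else 1) + (if r1 = 0 then 0 else 1)) < a0.1 <;>
    simp [pvInner, pvHamming,
      show PySem.Int.band 0 1 = 0 from by decide,
      show PySem.Int.band 2 1 = 0 from by decide,
      show PySem.Int.bor 2 0 = 2 from by decide,
      show PySem.Int.bxor 1 0 = 1 from by decide,
      show ((1:Int) <<< (1:Nat)) = 2 from by decide,
      show ((1:Int) >>> (1:Nat)) = 0 from by decide,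
    PySem.Dict.insert, PySem.Dict.contains, PySem.Dict.getD,
      PySem.Dict.get?, hc]

theorem pvL11 (m1 : Int) (p1 : String) (a0 a1 : Int × String) (r0 r1 : Int) :
    pvInner (1, (m1, p1)) r0 r1 (PySem.Dict.mk [(0, a0), (1, a1)]) 1 =
      PySem.Dict.mk [(0, a0), (1, if m1 + ((if r0 = 0 then 0 else 1) + (if r1 = 1 then 0 else 1)) < a1.1
                         then (m1 + ((if r0 = 0 then 0 else 1) + (if r1 = 1 then 0 else 1)), p1 ++ PySem.Int.toStr 1)
                         else a1)] := by
  by_cases hc : m1 + ((if r0 = 0 then 0 else 1) + (if r1 = 1 then 0 else 1)) < a1.1 <;>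
    simp [pvInner, pvHamming,
      show PySem.Int.band 0 1 = 0 from by decide,
      show PySem.Int.band 3 1 = 1 from by decide,
      show PySem.Int.bor 2 1 = 3 from by decide,
      show PySem.Int.bxor 0 1 = 1 from by decide,
      show ((1:Int) <<< (1:Nat)) = 2 from by decide,
      show ((1:Int) >>> (1:Nat)) = 0 from by decide,
    PySem.Dict.insert, PySem.Dict.contains, PySem.Dict.getD,
      PySem.Dict.get?, hc]

theorem pv_step (d : PySem.Dict Int (Int × String)) (st : Int × Option Int × List (Int × Int))
    (r0 r1 : Int) (h : pvInv d st) : pvInv (pvStepA d r0 r1) (pvStepB st r0 r1) := by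
  obtain ⟨m0, m1o, back⟩ := st
  cases m1o with
  | none =>
    obtain ⟨h1, h2, h3⟩ := h
    simp only at h1 h2
    subst h1 h2 h3
    have he : (PySem.Dict.empty.insert (0:Int) ((0:Int), "")).items = [(0, (0, ""))] := rfl
    simp only [pvStepA, he, List.foldl_cons, List.foldl_nil]
    rw [pvL00, pvL01]
    simp only [pvInv, pvStepB, pvBest]
    simp only [pvPathR, List.nil_append, List.reverse_cons, List.reverse_nil]
    norm_num
  | some m1 =>
    simp only [pvInv] at h
    simp only [pvStepA, h, List.foldl_cons, List.foldl_nil]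
    rw [pvL00, pvL01, pvL10, pvL11]
    simp only [pvInv, pvStepB, pvBest]
    simp only [List.reverse_append, List.reverse_cons, List.reverse_nil, List.nil_append,
      List.cons_append, pvPathR, pvSel]
    norm_num
    refine ⟨?_, ?_⟩ <;>
      (rw [Prod.ext_iff]
       constructor <;>
         simp only [apply_ite (Prod.fst (α := Int) (β := String)),
           apply_ite (Prod.snd (α := Int) (β := String)),
           apply_ite (Prod.fst (α := Int) (β := Int)),
           apply_ite (Prod.snd (α := Int) (β := Int)),
           apply_ite (pvPathR back.reverse)] <;>
         split_ifs <;> first | rfl | omega)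

theorem pv_fold (l : List Int) (f0 f1 : Int → Int) :
    ∀ (d : PySem.Dict Int (Int × String)) (st : Int × Option Int × List (Int × Int)),
    pvInv d st →
    pvInv (l.foldl (fun d i => pvStepA d (f0 i) (f1 i)) d)
          (l.foldl (fun st i => pvStepB st (f0 i) (f1 i)) st) := by
  induction l with
  | nil => intro d st h; exact h
  | cons i rest ih =>
    intro d st h
    exact ih _ _ (pv_step d st (f0 i) (f1 i) h)

theorem pv_final (d : PySem.Dict Int (Int × String)) (st : Int × Option Int × List (Int × Int))
    (h : pvInv d st) :
    (match PySem.List.min? d.values (fun x => x.1) with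
     | some best => best.2
     | none => "") =
    (match st.2.1 with
     | none => ""
     | some m1 =>
       let s : Int := if st.1 ≤ m1 then 0 else 1
       PySem.Str.join "" (((pvTraceback st.2.2 s).reverse).map PySem.Int.toStr)) := by
  obtain ⟨m0, m1o, back⟩ := st
  cases m1o with
  | none =>
    obtain ⟨h1, h2, h3⟩ := h
    subst h3
    rfl
  | some m1 =>
    simp only [pvInv] at h
    have hv : d.values = [(m0, pvPathR back.reverse 0), (m1, pvPathR back.reverse 1)] := by
      simp [PySem.Dict.values, h]
    simp only [hv, pvTraceback, pv_join_trace]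
    simp [PySem.List.min?]
    split_ifs <;> first | rfl | omega

-- ===== VERDICT (by name: the statement is the Claim_ definition above) =====
theorem decodificarMensaje_spec : Claim_equal_decodificarMensaje := by
  intro msg rate _ _
  unfold Spec_decodificarMensaje decodificarMensaje decodificarMensaje_alt
  have h0 : pvInv (PySem.Dict.empty.insert 0 (0, ""))
      ((0 : Int), (none : Option Int), ([] : List (Int × Int))) := by
    exact ⟨rfl, rfl, rfl⟩
  exact pv_final _ _ (pv_fold _ _ _ _ _ h0)
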